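-- pv_equiv track=rewrite | github.com/donkawechico/pact-js | scripts/build_sync_summary.py | _categorize_paths
-- ===== SOURCE A (Python) =====
-- def _categorize_paths(paths: list[str]) -> dict[str, list[str]]:
--     categories: dict[str, list[str]] = {
--         "spec": [],
--         "config_fixtures": [],
--         "message_fixtures": [],
--         "crypto_fixtures": [],
--         "examples": [],
--         "other_normative": [],
--         "other": [],
--     }
--
--     for path in paths:
--         if path == "SPEC.md":
--             categories["spec"].append(path)
--         elif path.startswith("fixtures/config/"):
--             categories["config_fixtures"].append(path)
--         elif path.startswith("fixtures/message/"):
--             categories["message_fixtures"].append(path)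
--         elif path.startswith("fixtures/crypto/"):
--             categories["crypto_fixtures"].append(path)
--         elif path.startswith("examples/"):
--             categories["examples"].append(path)
--         elif path.startswith("fixtures/"):
--             categories["other_normative"].append(path)
--         else:
--             categories["other"].append(path)
--
--     return categories
-- ===== SOURCE B (Python) =====
-- def _categorize_paths(paths: list[str]) -> dict[str, list[str]]:
--     def in_subdir(p):
--         return p.startswith(("fixtures/config/", "fixtures/message/", "fixtures/crypto/"))
--
--     return {
--         "spec": [p for p in paths if p == "SPEC.md"],
--         "config_fixtures": [p for p in paths if p.startswith("fixtures/config/")],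
--         "message_fixtures": [p for p in paths if p.startswith("fixtures/message/")],
--         "crypto_fixtures": [p for p in paths if p.startswith("fixtures/crypto/")],
--         "examples": [p for p in paths if p.startswith("examples/")],
--         "other_normative": [p for p in paths if p.startswith("fixtures/") and not in_subdir(p)],
--         "other": [p for p in paths
--                   if p != "SPEC.md" and not p.startswith(("fixtures/", "examples/"))],
--     }
-- ===== Notes on version B (the rewrite author's own statement) =====
-- stated objective: idiomatic
-- what changed: Replaces A's single stateful loop with a first-match if-elif dispatch by seven independent filter comprehensions, one per category, each with a self-contained predicate (the categories form a partition since the prefixes are pairwise disjoint and the subdirectory prefixes refine 'fixtures/').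
import Mathlib
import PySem

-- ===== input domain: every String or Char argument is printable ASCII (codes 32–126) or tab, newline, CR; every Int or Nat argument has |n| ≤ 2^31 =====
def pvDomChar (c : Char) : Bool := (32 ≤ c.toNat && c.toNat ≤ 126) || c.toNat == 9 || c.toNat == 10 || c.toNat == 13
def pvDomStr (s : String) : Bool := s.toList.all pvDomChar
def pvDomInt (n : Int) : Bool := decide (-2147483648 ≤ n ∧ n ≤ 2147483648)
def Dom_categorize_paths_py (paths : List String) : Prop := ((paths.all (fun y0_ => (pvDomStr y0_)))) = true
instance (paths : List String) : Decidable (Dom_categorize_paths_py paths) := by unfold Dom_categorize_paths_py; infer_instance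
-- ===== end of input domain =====

-- B replaces A's single stateful first-match dispatch loop by seven independent
-- filter passes, one per category (idiomatic restructure; same values).

-- ===== PORT A =====
def pvInitCats : PySem.Dict String (List String) :=
  PySem.Dict.ofList
    [("spec", []), ("config_fixtures", []), ("message_fixtures", []),
     ("crypto_fixtures", []), ("examples", []), ("other_normative", []), ("other", [])]

-- the body of A's for-loop
def pvStepA (cats : PySem.Dict String (List String)) (path : String) :
    PySem.Dict String (List String) :=
  if path == "SPEC.md" then cats.modify "spec" [] (· ++ [path])
  else if PySem.Str.startswith path "fixtures/config/" then cats.modify "config_fixtures" [] (· ++ [path])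
  else if PySem.Str.startswith path "fixtures/message/" then cats.modify "message_fixtures" [] (· ++ [path])
  else if PySem.Str.startswith path "fixtures/crypto/" then cats.modify "crypto_fixtures" [] (· ++ [path])
  else if PySem.Str.startswith path "examples/" then cats.modify "examples" [] (· ++ [path])
  else if PySem.Str.startswith path "fixtures/" then cats.modify "other_normative" [] (· ++ [path])
  else cats.modify "other" [] (· ++ [path])

def categorize_paths_py (paths : List String) : List (String × List String) :=
  (paths.foldl pvStepA pvInitCats).items

-- ===== PORT B =====
-- p.startswith(("fixtures/config/", "fixtures/message/", "fixtures/crypto/"))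
def pvInSubdir (p : String) : Bool :=
  PySem.Str.startswith p "fixtures/config/" || PySem.Str.startswith p "fixtures/message/" ||
    PySem.Str.startswith p "fixtures/crypto/"

def categorize_paths_py_alt (paths : List String) : List (String × List String) :=
  [("spec", paths.filter (fun p => p == "SPEC.md")),
   ("config_fixtures", paths.filter (fun p => PySem.Str.startswith p "fixtures/config/")),
   ("message_fixtures", paths.filter (fun p => PySem.Str.startswith p "fixtures/message/")),
   ("crypto_fixtures", paths.filter (fun p => PySem.Str.startswith p "fixtures/crypto/")),
   ("examples", paths.filter (fun p => PySem.Str.startswith p "examples/")),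
   ("other_normative", paths.filter (fun p => PySem.Str.startswith p "fixtures/" && !pvInSubdir p)),
   ("other", paths.filter (fun p =>
      !(p == "SPEC.md") && !(PySem.Str.startswith p "fixtures/" || PySem.Str.startswith p "examples/")))]

-- ===== PRECONDITION & SPEC =====
def Spec_categorize_paths_py (paths : List String) (out : List (String × List String)) : Prop := out = categorize_paths_py_alt paths
instance (paths : List String) (out : List (String × List String)) : Decidable (Spec_categorize_paths_py paths out) := by unfold Spec_categorize_paths_py; infer_instance

-- ===== CLAIM =====
def Claim_equal_categorize_paths_py : Prop := ∀ (paths : List String), Dom_categorize_paths_py paths → Spec_categorize_paths_py paths (categorize_paths_py paths)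

-- ===== LEMMAS AND PROOFS =====
-- startswith is antitone in the prefix
lemma sw_mono (p a b : String) (hab : a.toList <+: b.toList)
    (h : PySem.Str.startswith p b = true) : PySem.Str.startswith p a = true := by
  simp only [PySem.Str.startswith_eq, PySem.Chars.startswith_iff] at *
  exact hab.trans h

-- two incomparable literal prefixes cannot both hold
lemma sw_excl (p a b : String) (hna : ¬ a.toList <+: b.toList) (hnb : ¬ b.toList <+: a.toList)
    (h : PySem.Str.startswith p a = true) : PySem.Str.startswith p b = false := by
  simp only [PySem.Str.startswith_eq, PySem.Chars.startswith_iff] at h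
  simp only [PySem.Str.startswith_eq]
  by_contra hb
  rw [Bool.not_eq_false, PySem.Chars.startswith_iff] at hb
  rcases (List.prefix_or_prefix_of_prefix h hb) with h1 | h1
  · exact hna h1
  · exact hnb h1

-- the seven-accumulator invariant of A's loop
lemma foldl_stepA (paths : List String) : ∀ s c m cr e on o : List String,
    ((paths.foldl pvStepA (PySem.Dict.mk
        [("spec", s), ("config_fixtures", c), ("message_fixtures", m), ("crypto_fixtures", cr),
         ("examples", e), ("other_normative", on), ("other", o)])).items)
    = [("spec", s ++ paths.filter (fun p => p == "SPEC.md")),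
       ("config_fixtures", c ++ paths.filter (fun p => PySem.Str.startswith p "fixtures/config/")),
       ("message_fixtures", m ++ paths.filter (fun p => PySem.Str.startswith p "fixtures/message/")),
       ("crypto_fixtures", cr ++ paths.filter (fun p => PySem.Str.startswith p "fixtures/crypto/")),
       ("examples", e ++ paths.filter (fun p => PySem.Str.startswith p "examples/")),
       ("other_normative", on ++ paths.filter (fun p => PySem.Str.startswith p "fixtures/" && !pvInSubdir p)),
       ("other", o ++ paths.filter (fun p =>
          !(p == "SPEC.md") && !(PySem.Str.startswith p "fixtures/" || PySem.Str.startswith p "examples/")))] := by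
  induction paths with
  | nil => intro s c m cr e on o; simp
  | cons p ps ih =>
    intro s c m cr e on o
    simp only [List.foldl_cons]
    by_cases h1 : (p == "SPEC.md") = true
    · have hp : p = "SPEC.md" := by simpa using h1
      have hq1 : PySem.Str.startswith p "fixtures/config/" = false := by rw [hp]; decide
      have hq2 : PySem.Str.startswith p "fixtures/message/" = false := by rw [hp]; decide
      have hq3 : PySem.Str.startswith p "fixtures/crypto/" = false := by rw [hp]; decide
      have hq4 : PySem.Str.startswith p "examples/" = false := by rw [hp]; decide
      have hq5 : PySem.Str.startswith p "fixtures/" = false := by rw [hp]; decide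
      simp [PySem.Str.startswith_eq] at hq1 hq2 hq3 hq4 hq5
      rw [show pvStepA (PySem.Dict.mk
        [("spec", s), ("config_fixtures", c), ("message_fixtures", m), ("crypto_fixtures", cr), ("examples", e), ("other_normative", on), ("other", o)]) p = PySem.Dict.mk
        [("spec", s ++ [p]), ("config_fixtures", c), ("message_fixtures", m), ("crypto_fixtures", cr), ("examples", e), ("other_normative", on), ("other", o)] from by
          simp [pvStepA, h1, PySem.Dict.modify, PySem.Dict.insert, PySem.Dict.getD, PySem.Dict.get?, PySem.Dict.contains]]
      rw [ih]
      simp [pvInSubdir, h1, hq1, hq2, hq3, hq4, hq5]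
    · rw [Bool.not_eq_true] at h1
      by_cases h2 : PySem.Str.startswith p "fixtures/config/" = true
      · have hx1 : PySem.Str.startswith p "fixtures/message/" = false := sw_excl p "fixtures/config/" "fixtures/message/" (by decide) (by decide) h2
        have hx2 : PySem.Str.startswith p "fixtures/crypto/" = false := sw_excl p "fixtures/config/" "fixtures/crypto/" (by decide) (by decide) h2
        have hx3 : PySem.Str.startswith p "examples/" = false := sw_excl p "fixtures/config/" "examples/" (by decide) (by decide) h2
        have hf4 : PySem.Str.startswith p "fixtures/" = true := sw_mono p "fixtures/" "fixtures/config/" (by decide) h2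
        simp [PySem.Str.startswith_eq] at h2 hx1 hx2 hx3 hf4
        rw [show pvStepA (PySem.Dict.mk
        [("spec", s), ("config_fixtures", c), ("message_fixtures", m), ("crypto_fixtures", cr), ("examples", e), ("other_normative", on), ("other", o)]) p = PySem.Dict.mk
        [("spec", s), ("config_fixtures", c ++ [p]), ("message_fixtures", m), ("crypto_fixtures", cr), ("examples", e), ("other_normative", on), ("other", o)] from by
            simp [pvStepA, h1, h2, PySem.Dict.modify, PySem.Dict.insert, PySem.Dict.getD, PySem.Dict.get?, PySem.Dict.contains]]
        rw [ih]
        simp [pvInSubdir, h1, h2, hx1, hx2, hx3, hf4]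
      · rw [Bool.not_eq_true] at h2
        by_cases h3 : PySem.Str.startswith p "fixtures/message/" = true
        · have hx2 : PySem.Str.startswith p "fixtures/crypto/" = false := sw_excl p "fixtures/message/" "fixtures/crypto/" (by decide) (by decide) h3
          have hx3 : PySem.Str.startswith p "examples/" = false := sw_excl p "fixtures/message/" "examples/" (by decide) (by decide) h3
          have hf4 : PySem.Str.startswith p "fixtures/" = true := sw_mono p "fixtures/" "fixtures/message/" (by decide) h3
          simp [PySem.Str.startswith_eq] at h2 h3 hx2 hx3 hf4
          rw [show pvStepA (PySem.Dict.mk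
        [("spec", s), ("config_fixtures", c), ("message_fixtures", m), ("crypto_fixtures", cr), ("examples", e), ("other_normative", on), ("other", o)]) p = PySem.Dict.mk
        [("spec", s), ("config_fixtures", c), ("message_fixtures", m ++ [p]), ("crypto_fixtures", cr), ("examples", e), ("other_normative", on), ("other", o)] from by
              simp [pvStepA, h1, h2, h3, PySem.Dict.modify, PySem.Dict.insert, PySem.Dict.getD, PySem.Dict.get?, PySem.Dict.contains]]
          rw [ih]
          simp [pvInSubdir, h1, h2, h3, hx2, hx3, hf4]
        · rw [Bool.not_eq_true] at h3
          by_cases h4 : PySem.Str.startswith p "fixtures/crypto/" = true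
          · have hx3 : PySem.Str.startswith p "examples/" = false := sw_excl p "fixtures/crypto/" "examples/" (by decide) (by decide) h4
            have hf4 : PySem.Str.startswith p "fixtures/" = true := sw_mono p "fixtures/" "fixtures/crypto/" (by decide) h4
            simp [PySem.Str.startswith_eq] at h2 h3 h4 hx3 hf4
            rw [show pvStepA (PySem.Dict.mk
        [("spec", s), ("config_fixtures", c), ("message_fixtures", m), ("crypto_fixtures", cr), ("examples", e), ("other_normative", on), ("other", o)]) p = PySem.Dict.mk
        [("spec", s), ("config_fixtures", c), ("message_fixtures", m), ("crypto_fixtures", cr ++ [p]), ("examples", e), ("other_normative", on), ("other", o)] from by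
                simp [pvStepA, h1, h2, h3, h4, PySem.Dict.modify, PySem.Dict.insert, PySem.Dict.getD, PySem.Dict.get?, PySem.Dict.contains]]
            rw [ih]
            simp [pvInSubdir, h1, h2, h3, h4, hx3, hf4]
          · rw [Bool.not_eq_true] at h4
            by_cases h5 : PySem.Str.startswith p "examples/" = true
            · have hx4 : PySem.Str.startswith p "fixtures/" = false := sw_excl p "examples/" "fixtures/" (by decide) (by decide) h5
              simp [PySem.Str.startswith_eq] at h2 h3 h4 h5 hx4
              rw [show pvStepA (PySem.Dict.mk
        [("spec", s), ("config_fixtures", c), ("message_fixtures", m), ("crypto_fixtures", cr), ("examples", e), ("other_normative", on), ("other", o)]) p = PySem.Dict.mk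
        [("spec", s), ("config_fixtures", c), ("message_fixtures", m), ("crypto_fixtures", cr), ("examples", e ++ [p]), ("other_normative", on), ("other", o)] from by
                  simp [pvStepA, h1, h2, h3, h4, h5, PySem.Dict.modify, PySem.Dict.insert, PySem.Dict.getD, PySem.Dict.get?, PySem.Dict.contains]]
              rw [ih]
              simp [pvInSubdir, h1, h2, h3, h4, h5, hx4]
            · rw [Bool.not_eq_true] at h5
              by_cases h6 : PySem.Str.startswith p "fixtures/" = true
              · simp [PySem.Str.startswith_eq] at h2 h3 h4 h5 h6
                rw [show pvStepA (PySem.Dict.mk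
        [("spec", s), ("config_fixtures", c), ("message_fixtures", m), ("crypto_fixtures", cr), ("examples", e), ("other_normative", on), ("other", o)]) p = PySem.Dict.mk
        [("spec", s), ("config_fixtures", c), ("message_fixtures", m), ("crypto_fixtures", cr), ("examples", e), ("other_normative", on ++ [p]), ("other", o)] from by
                    simp [pvStepA, h1, h2, h3, h4, h5, h6, PySem.Dict.modify, PySem.Dict.insert, PySem.Dict.getD, PySem.Dict.get?, PySem.Dict.contains]]
                rw [ih]
                simp [pvInSubdir, h1, h2, h3, h4, h5, h6]
              · rw [Bool.not_eq_true] at h6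
                simp [PySem.Str.startswith_eq] at h2 h3 h4 h5 h6
                rw [show pvStepA (PySem.Dict.mk
        [("spec", s), ("config_fixtures", c), ("message_fixtures", m), ("crypto_fixtures", cr), ("examples", e), ("other_normative", on), ("other", o)]) p = PySem.Dict.mk
        [("spec", s), ("config_fixtures", c), ("message_fixtures", m), ("crypto_fixtures", cr), ("examples", e), ("other_normative", on), ("other", o ++ [p])] from by
                    simp [pvStepA, h1, h2, h3, h4, h5, h6, PySem.Dict.modify, PySem.Dict.insert, PySem.Dict.getD, PySem.Dict.get?, PySem.Dict.contains]]
                rw [ih]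
                simp [pvInSubdir, h1, h2, h3, h4, h5, h6]

-- ===== VERDICT =====
theorem categorize_paths_py_spec : Claim_equal_categorize_paths_py := by
  intro paths _
  unfold Spec_categorize_paths_py categorize_paths_py categorize_paths_py_alt
  rw [show pvInitCats = PySem.Dict.mk
      [("spec", []), ("config_fixtures", []), ("message_fixtures", []), ("crypto_fixtures", []),
       ("examples", []), ("other_normative", []), ("other", [])] from by decide]
  rw [foldl_stepA]
  simp
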